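-- pv_equiv track=rewrite | github.com/allnes/openvino-quality-suite | src/oviqs/adapters/reporting/markdown_renderer.py | _section_status
-- ===== SOURCE A (Python) =====
-- from typing import Any
--
-- def _section_status(rows: list[dict[str, Any]]) -> str:
--     statuses = {row.get("status") for row in rows}
--     if "fail" in statuses:
--         return "fail"
--     if "warning" in statuses:
--         return "warning"
--     if "unknown" in statuses:
--         return "unknown"
--     return "pass"
-- ===== SOURCE B (Python) =====
-- def _section_status(rows):
--     priority = {"fail": 3, "warning": 2, "unknown": 1}
--     best = 0
--     for row in rows:
--         best = max(best, priority.get(row.get("status"), 0))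
--     return {3: "fail", 2: "warning", 1: "unknown"}.get(best, "pass")
-- ===== Notes on version B (the rewrite author's own statement) =====
-- stated objective: alternative
-- what changed: Replaces building a set of statuses followed by three ordered membership tests with a single fold that keeps a running maximum severity rank, and a final rank-to-string lookup.
import Mathlib
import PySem

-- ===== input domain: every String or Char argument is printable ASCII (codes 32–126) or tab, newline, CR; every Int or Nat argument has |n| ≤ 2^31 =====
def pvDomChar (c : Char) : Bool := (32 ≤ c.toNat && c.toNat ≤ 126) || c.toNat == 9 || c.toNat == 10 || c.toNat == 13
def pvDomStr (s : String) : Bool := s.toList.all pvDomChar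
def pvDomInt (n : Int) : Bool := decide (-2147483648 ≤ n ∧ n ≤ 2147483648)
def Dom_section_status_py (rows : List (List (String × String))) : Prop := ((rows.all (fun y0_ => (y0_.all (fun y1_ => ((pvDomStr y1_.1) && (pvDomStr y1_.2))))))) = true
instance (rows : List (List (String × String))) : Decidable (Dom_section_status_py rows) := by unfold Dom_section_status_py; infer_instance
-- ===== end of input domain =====

-- B replaces A's set-of-statuses plus three ordered membership tests by one fold
-- keeping a running maximum severity rank, decoded to a string at the end (alternative decomposition).

-- ===== PORT A =====
def section_status_py (rows : List (List (String × String))) : String :=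
  let statuses : PySem.Set (Option String) :=
    PySem.Set.ofList (rows.map (fun row => (PySem.Dict.mk row).get? "status"))
  if PySem.Set.contains statuses (some "fail") then "fail"
  else if PySem.Set.contains statuses (some "warning") then "warning"
  else if PySem.Set.contains statuses (some "unknown") then "unknown"
  else "pass"

-- ===== PORT B =====
-- dict literals with distinct keys: Dict.mk of the pair list is exact
def pvPriority : PySem.Dict String Int :=
  PySem.Dict.mk [("fail", 3), ("warning", 2), ("unknown", 1)]

def pvInverse : PySem.Dict Int String :=
  PySem.Dict.mk [(3, "fail"), (2, "warning"), (1, "unknown")]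

def pvRank (row : List (String × String)) : Int :=
  match (PySem.Dict.mk row).get? "status" with
  | none => 0
  | some s => pvPriority.getD s 0

def section_status_py_alt (rows : List (List (String × String))) : String :=
  let best := rows.foldl (fun b row => max b (pvRank row)) 0
  pvInverse.getD best "pass"

-- ===== PRECONDITION & SPEC =====
def Spec_section_status_py (rows : List (List (String × String))) (out : String) : Prop := out = section_status_py_alt rows
instance (rows : List (List (String × String))) (out : String) : Decidable (Spec_section_status_py rows out) := by unfold Spec_section_status_py; infer_instance

-- ===== CLAIM (what is proved, stated in full; the proofs are below) =====
def Claim_equal_section_status_py : Prop := ∀ (rows : List (List (String × String))), Dom_section_status_py rows → Spec_section_status_py rows (section_status_py rows)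

-- ===== LEMMAS AND PROOFS =====

def pvSt (row : List (String × String)) : Option String := (PySem.Dict.mk row).get? "status"

theorem pvRank_spec (row : List (String × String)) :
    (0 ≤ pvRank row ∧ pvRank row ≤ 3) ∧
    (pvRank row = 3 ↔ pvSt row = some "fail") ∧
    (pvRank row = 2 ↔ pvSt row = some "warning") ∧
    (pvRank row = 1 ↔ pvSt row = some "unknown") := by
  unfold pvRank pvSt
  cases h : (PySem.Dict.mk row).get? "status" with
  | none => simp
  | some s =>
    by_cases h1 : "fail" = s
    · subst h1
      simp [pvPriority, PySem.Dict.getD_eq_get?_getD, PySem.Dict.get?_mk_cons]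
    · by_cases h2 : "warning" = s
      · subst h2
        simp [pvPriority, PySem.Dict.getD_eq_get?_getD, PySem.Dict.get?_mk_cons]
      · by_cases h3 : "unknown" = s
        · subst h3
          simp [pvPriority, PySem.Dict.getD_eq_get?_getD, PySem.Dict.get?_mk_cons]
        · have h1' : ¬(s = "fail") := fun hh => h1 hh.symm
          have h2' : ¬(s = "warning") := fun hh => h2 hh.symm
          have h3' : ¬(s = "unknown") := fun hh => h3 hh.symm
          simp [pvPriority, PySem.Dict.getD_eq_get?_getD, PySem.Dict.get?_mk_cons,
            h1, h2, h3, h1', h2', h3', PySem.Dict.get?]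

theorem pvFold_hoist (rows : List (List (String × String))) (a : Int) (ha : 0 ≤ a) :
    rows.foldl (fun b row => max b (pvRank row)) a =
      max a (rows.foldl (fun b row => max b (pvRank row)) 0) := by
  induction rows generalizing a with
  | nil => simp; omega
  | cons r rs ih =>
    simp only [List.foldl_cons]
    rw [ih (max a (pvRank r)) (le_max_of_le_left ha),
        ih (max 0 (pvRank r)) (le_max_left 0 _)]
    have := (pvRank_spec r).1.1
    omega

theorem pvFold_spec (rows : List (List (String × String))) :
    let G := rows.foldl (fun b row => max b (pvRank row)) 0
    (0 ≤ G ∧ G ≤ 3) ∧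
    (G = 3 ↔ (some "fail") ∈ rows.map pvSt) ∧
    (2 ≤ G ↔ (some "fail") ∈ rows.map pvSt ∨ (some "warning") ∈ rows.map pvSt) ∧
    (1 ≤ G ↔ (some "fail") ∈ rows.map pvSt ∨ (some "warning") ∈ rows.map pvSt ∨
        (some "unknown") ∈ rows.map pvSt) := by
  induction rows with
  | nil => simp
  | cons r rs ih =>
    simp only [List.foldl_cons, List.map_cons, List.mem_cons]
    rw [pvFold_hoist rs (max 0 (pvRank r)) (le_max_left 0 _)]
    obtain ⟨⟨hG0, hG3⟩, h3, h2, h1⟩ := ih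
    obtain ⟨⟨hr0, hr3⟩, r3, r2, r1⟩ := pvRank_spec r
    have e3 : (some "fail" = pvSt r) ↔ pvRank r = 3 :=
      ⟨fun h => r3.mpr h.symm, fun h => (r3.mp h).symm⟩
    have e2 : (some "warning" = pvSt r) ↔ pvRank r = 2 :=
      ⟨fun h => r2.mpr h.symm, fun h => (r2.mp h).symm⟩
    have e1 : (some "unknown" = pvSt r) ↔ pvRank r = 1 :=
      ⟨fun h => r1.mpr h.symm, fun h => (r1.mp h).symm⟩
    rw [e3, e2, e1]
    by_cases hf : (some "fail") ∈ rs.map pvSt <;>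
      by_cases hw : (some "warning") ∈ rs.map pvSt <;>
        by_cases hu : (some "unknown") ∈ rs.map pvSt <;>
          (simp only [hf, hw, hu, iff_true, iff_false, or_true, true_or, or_false,
             false_or, not_or] at h3 h2 h1 ⊢ <;> omega)

-- ===== VERDICT (by name: the statement is the Claim_ definition above) =====
theorem section_status_py_spec : Claim_equal_section_status_py := by
  intro rows _
  unfold Spec_section_status_py section_status_py section_status_py_alt
  obtain ⟨⟨hG0, hG3⟩, h3, h2, h1⟩ := pvFold_spec rows
  simp only [PySem.Set.contains_eq_listContains, List.contains_iff_mem,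
    PySem.Set.mem_ofList, List.mem_map]
  simp only [List.mem_map, pvSt] at h3 h2 h1
  set G := rows.foldl (fun b row => max b (pvRank row)) 0 with hGdef
  by_cases hf : ∃ a ∈ rows, (PySem.Dict.mk a).get? "status" = some "fail"
  · have hG : G = 3 := h3.mpr hf
    simp [hf, hG, pvInverse, PySem.Dict.getD_eq_get?_getD, PySem.Dict.get?_mk_cons]
  · by_cases hw : ∃ a ∈ rows, (PySem.Dict.mk a).get? "status" = some "warning"
    · have hG : G = 2 := by
        have h2' := h2.mpr (Or.inr hw)
        have hne : G ≠ 3 := fun h => hf (h3.mp h)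
        omega
      simp [hf, hw, hG, pvInverse, PySem.Dict.getD_eq_get?_getD, PySem.Dict.get?_mk_cons]
    · by_cases hu : ∃ a ∈ rows, (PySem.Dict.mk a).get? "status" = some "unknown"
      · have hG : G = 1 := by
          have h1' := h1.mpr (Or.inr (Or.inr hu))
          have hne : ¬ 2 ≤ G := fun h => (h2.mp h).elim hf hw
          omega
        simp [hf, hw, hu, hG, pvInverse, PySem.Dict.getD_eq_get?_getD,
          PySem.Dict.get?_mk_cons]
      · have hG : G = 0 := by
          have hne : ¬ 1 ≤ G := fun h => (h1.mp h).elim hf (fun h' => h'.elim hw hu)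
          omega
        rw [if_neg hf, if_neg hw, if_neg hu]
        simp [hG, pvInverse, PySem.Dict.getD_eq_get?_getD, PySem.Dict.get?]
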